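-- pv_equiv track=rewrite | github.com/tillbiskup/cwepr | cwepr/io/bes3t.py | _subdivide_part3
-- ===== SOURCE A (Python) =====
-- import collections
--
-- def _subdivide_part3(part3):
--     r"""Pre process the third part of a \*.DSC file.
--
--     Third part corresponds to the "Device Specific Layer" The crude string
--     is split into subdivisions, which start with a headline containing the
--     fragment ".DVC" Each subdivision is then transformed into a dict entry
--     with the headline, stripped of the first eight characters (".DVC")
--     as key and the remaining information as value. Lines containing
--     asterisks are removed.
--
--     Parameters
--     ----------
--     part3: :class:`str`
--         Raw third part of a file.
--
--     Returns
--     -------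
--     subparts_clean: :class:`dict`
--         All subdivisions from the file with headlines as keys and list of
--         lines as values; lines devoid of information removed.
--
--     """
--     lines = part3.split("\n")
--     subdivisions = collections.OrderedDict()
--     current_subpart = list()
--     for line in lines:
--         if "*" in line:
--             continue
--         if ".DVC" in line and current_subpart != []:
--             if len(current_subpart) == 1:
--                 subdivisions[current_subpart[0][9:]] = []
--             else:
--                 subdivisions[current_subpart[0][9:]] = current_subpart[1:]
--             current_subpart.clear()
--         current_subpart.append(line)
--     if len(current_subpart) == 1:
--         subdivisions[current_subpart[0][9:]] = []
--     elif current_subpart: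
--         subdivisions[current_subpart[0][9:]] = current_subpart[1:]
--     return subdivisions
-- ===== SOURCE B (Python) =====
-- import collections
--
--
-- def _span(xs):
--     """Split xs into (longest prefix of lines without '.DVC', the rest)."""
--     if xs and ".DVC" not in xs[0]:
--         head, tail = _span(xs[1:])
--         return [xs[0]] + head, tail
--     return [], xs
--
--
-- def _subdivide_part3(part3):
--     result = collections.OrderedDict()
--     remaining = [line for line in part3.split("\n") if "*" not in line]
--     while remaining:
--         head, rest = remaining[0], remaining[1:]
--         body, remaining = _span(rest)
--         result[head[9:]] = body
--     return result
-- ===== Notes on version B (the rewrite author's own statement) =====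
-- stated objective: alternative
-- what changed: A's single streaming loop with an accumulate-and-flush current_subpart buffer and a trailing duplicate flush is replaced by a filter-then-chunk decomposition: drop asterisk-containing lines once, then repeatedly split off one group (headline plus the span of following non-headline lines) with a recursive span helper, with no flush logic or length-one special case.
import Mathlib
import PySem

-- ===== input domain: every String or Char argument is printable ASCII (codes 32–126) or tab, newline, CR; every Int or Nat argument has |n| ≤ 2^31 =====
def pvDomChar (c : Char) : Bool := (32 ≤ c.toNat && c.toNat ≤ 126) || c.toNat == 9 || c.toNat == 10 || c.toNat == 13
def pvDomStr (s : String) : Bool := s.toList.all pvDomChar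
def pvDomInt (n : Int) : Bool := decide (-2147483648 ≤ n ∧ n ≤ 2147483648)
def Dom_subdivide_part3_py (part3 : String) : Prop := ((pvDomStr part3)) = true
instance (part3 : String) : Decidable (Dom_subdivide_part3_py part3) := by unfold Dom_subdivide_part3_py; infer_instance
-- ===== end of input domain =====

-- B replaces A's streaming accumulate/flush loop by filter-then-chunk: filter asterisk-containing lines once,
-- then repeatedly split off one group with a span helper (objective: alternative decomposition).


-- ===== PORT A =====
-- current_subpart[0][9:] (only reached with a nonempty current_subpart)
def pvKey9 (cur : List String) : String := PySem.Str.slice (cur.headD "") (some 9) none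

-- the flush 'if len == 1 then [] else current_subpart[1:]' written out as in A
def pvFlushA (d : PySem.Dict String (List String)) (cur : List String) :
    PySem.Dict String (List String) :=
  if cur.length = 1 then d.insert (pvKey9 cur) []
  else d.insert (pvKey9 cur) (PySem.List.slice cur (some 1) none)

-- one iteration of A's for-loop over (dict, current_subpart)
def pvStepA (st : PySem.Dict String (List String) × List String) (line : String) :
    PySem.Dict String (List String) × List String :=
  if PySem.Str.isIn "*" line then st
  else
    let st := if PySem.Str.isIn ".DVC" line ∧ st.2 ≠ [] then (pvFlushA st.1 st.2, ([] : List String)) else st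
    (st.1, st.2 ++ [line])

-- the trailing 'if len == 1 … elif current_subpart …' after the loop
def pvFinalA (st : PySem.Dict String (List String) × List String) :
    PySem.Dict String (List String) :=
  if st.2.length = 1 then st.1.insert (pvKey9 st.2) []
  else if st.2 ≠ [] then st.1.insert (pvKey9 st.2) (PySem.List.slice st.2 (some 1) none)
  else st.1

def subdivide_part3_py (part3 : String) : List (String × List String) :=
  (pvFinalA (((PySem.Str.split? part3 "\n").getD []).foldl pvStepA (PySem.Dict.empty, []))).items

-- ===== PORT B =====
-- _span: longest prefix of lines without ".DVC", and the rest
def pvSpanB : List String → List String × List String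
  | [] => ([], [])
  | x :: rest =>
    if PySem.Str.isIn ".DVC" x then ([], x :: rest)
    else
      let p := pvSpanB rest
      (x :: p.1, p.2)

-- needed by pvGoB's termination proof (cited in decreasing_by)
theorem pvSpanB_snd_len_le (xs : List String) : (pvSpanB xs).2.length ≤ xs.length := by
  induction xs with
  | nil => simp [pvSpanB]
  | cons x rest ih =>
    by_cases h : PySem.Chars.isIn ['.', 'D', 'V', 'C'] x.toList = true
    · simp [pvSpanB, h]
    · have := ih
      simp [pvSpanB, h]
      omega

-- the while-loop of B over (result, remaining)
def pvGoB (d : PySem.Dict String (List String)) : List String → PySem.Dict String (List String)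
  | [] => d
  | head :: rest =>
    let p := pvSpanB rest
    pvGoB (d.insert (PySem.Str.slice head (some 9) none) p.1) p.2
termination_by xs => xs.length
decreasing_by
  have := pvSpanB_snd_len_le rest
  simp only [List.length_cons]; omega

def subdivide_part3_py_alt (part3 : String) : List (String × List String) :=
  (pvGoB PySem.Dict.empty
    (((PySem.Str.split? part3 "\n").getD []).filter (fun l => ! PySem.Str.isIn "*" l))).items

-- ===== PRECONDITION & SPEC =====
def Spec_subdivide_part3_py (part3 : String) (out : List (String × List String)) : Prop := out = subdivide_part3_py_alt part3
instance (part3 : String) (out : List (String × List String)) : Decidable (Spec_subdivide_part3_py part3 out) := by unfold Spec_subdivide_part3_py; infer_instance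

-- ===== CLAIM (what is proved, stated in full; the proofs are below) =====
def Claim_equal_subdivide_part3_py : Prop := ∀ (part3 : String), Dom_subdivide_part3_py part3 → Spec_subdivide_part3_py part3 (subdivide_part3_py part3)

-- ===== LEMMAS AND PROOFS =====

-- folding A's step over any list equals folding it over the '*'-filtered list
theorem pvFoldA_filter (xs : List String)
    (st : PySem.Dict String (List String) × List String) :
    xs.foldl pvStepA st = (xs.filter (fun l => ! PySem.Str.isIn "*" l)).foldl pvStepA st := by
  induction xs generalizing st with
  | nil => rfl
  | cons x rest ih =>
    by_cases h : PySem.Chars.isIn ['*'] x.toList = true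
    · simp [h, pvStepA, ih]
    · simp [h, ih]

theorem pvFlushA_cons (d : PySem.Dict String (List String)) (h : String) (body : List String) :
    pvFlushA d (h :: body) = d.insert (pvKey9 (h :: body)) body := by
  cases body with
  | nil => simp [pvFlushA]
  | cons b bs => simp [pvFlushA, PySem.List.slice_from_one]

theorem pvFinalA_cons (d : PySem.Dict String (List String)) (h : String) (body : List String) :
    pvFinalA (d, h :: body) = d.insert (pvKey9 (h :: body)) body := by
  cases body with
  | nil => simp [pvFinalA]
  | cons b bs => simp [pvFinalA, PySem.List.slice_from_one]

theorem pvSpanB_eq (xs : List String) :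
    pvSpanB xs = (xs.takeWhile (fun l => ! PySem.Str.isIn ".DVC" l),
                  xs.dropWhile (fun l => ! PySem.Str.isIn ".DVC" l)) := by
  induction xs with
  | nil => rfl
  | cons x rest ih =>
    by_cases h : PySem.Chars.isIn ['.', 'D', 'V', 'C'] x.toList = true
    · simp [pvSpanB, h]
    · simp [pvSpanB, h, ih]

-- the main invariant: A's remaining fold + final flush equals B's loop on the unprocessed suffix
theorem pvMain (xs : List String) (hstar : ∀ l ∈ xs, PySem.Chars.isIn ['*'] l.toList = false) :
    ∀ (d : PySem.Dict String (List String)) (h : String) (body : List String),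
    pvFinalA (xs.foldl pvStepA (d, h :: body)) =
      pvGoB (d.insert (pvKey9 (h :: body))
              (body ++ xs.takeWhile (fun l => ! PySem.Str.isIn ".DVC" l)))
            (xs.dropWhile (fun l => ! PySem.Str.isIn ".DVC" l)) := by
  induction xs with
  | nil =>
    intro d h body
    simp [List.foldl_nil, pvFinalA_cons, pvGoB]
  | cons x rest ih =>
    intro d h body
    have hx : PySem.Chars.isIn ['*'] x.toList = false := hstar x (by simp)
    have hrest : ∀ l ∈ rest, PySem.Chars.isIn ['*'] l.toList = false :=
      fun l hl => hstar l (by simp [hl])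
    by_cases hdvc : PySem.Chars.isIn ['.', 'D', 'V', 'C'] x.toList = true
    · have hstep : pvStepA (d, h :: body) x = (d.insert (pvKey9 (h :: body)) body, [x]) := by
        simp [pvStepA, hx, hdvc, pvFlushA_cons]
      rw [List.foldl_cons, hstep, ih hrest]
      simp [hdvc, pvGoB, pvSpanB_eq, pvKey9]
    · have hstep : pvStepA (d, h :: body) x = (d, h :: (body ++ [x])) := by
        simp [pvStepA, hx, hdvc]
      rw [List.foldl_cons, hstep, ih hrest]
      simp [hdvc, pvKey9, List.append_assoc]

theorem pvTop (fs : List String) (hstar : ∀ l ∈ fs, PySem.Chars.isIn ['*'] l.toList = false) :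
    (pvFinalA (fs.foldl pvStepA (PySem.Dict.empty, []))).items =
      (pvGoB PySem.Dict.empty fs).items := by
  cases fs with
  | nil => simp [pvFinalA, pvGoB]
  | cons x rest =>
    have hx : PySem.Chars.isIn ['*'] x.toList = false := hstar x (List.mem_cons_self)
    have hrest : ∀ l ∈ rest, PySem.Chars.isIn ['*'] l.toList = false :=
      fun l hl => hstar l (List.mem_cons_of_mem _ hl)
    have hstep : pvStepA (PySem.Dict.empty, []) x = (PySem.Dict.empty, [x]) := by
      simp [pvStepA, hx]
    rw [List.foldl_cons, hstep, pvMain rest hrest]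
    simp [pvGoB, pvSpanB_eq, pvKey9]

-- ===== VERDICT (by name: the statement is the Claim_ definition above) =====
theorem subdivide_part3_py_spec : Claim_equal_subdivide_part3_py := by
  intro part3 _
  unfold Spec_subdivide_part3_py subdivide_part3_py subdivide_part3_py_alt
  rw [pvFoldA_filter]
  exact pvTop _ (by
    intro l hl
    have := List.of_mem_filter hl
    simpa using this)
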